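-- pv_equiv track=rewrite | github.com/osama1998H/standerdLearnd-string | q21.py | new_func
-- ===== SOURCE A (Python) =====
-- def new_func(string: str):
--     count = 0
--     for i in string:
--         if string.index(i) <= 3 and i.isupper():
--             count += 1
--     if count >= 2:
--         return string.upper()
--     else:
--         return string
-- ===== SOURCE B (Python) =====
-- def new_func(string: str):
--     qualifying = {c for c in string[:4] if c.isupper()}
--     count = sum(string.count(c) for c in qualifying)
--     return string.upper() if count >= 2 else string
-- ===== Notes on version B (the rewrite author's own statement) =====
-- stated objective: faster
-- what changed: Replaces the per-character string.index scan with a one-pass build of the set of uppercase chars occurring in string[:4] and a sum of their multiplicities via string.count, since first-occurrence index <= 3 is equivalent to membership in string[:4].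
import Mathlib
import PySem

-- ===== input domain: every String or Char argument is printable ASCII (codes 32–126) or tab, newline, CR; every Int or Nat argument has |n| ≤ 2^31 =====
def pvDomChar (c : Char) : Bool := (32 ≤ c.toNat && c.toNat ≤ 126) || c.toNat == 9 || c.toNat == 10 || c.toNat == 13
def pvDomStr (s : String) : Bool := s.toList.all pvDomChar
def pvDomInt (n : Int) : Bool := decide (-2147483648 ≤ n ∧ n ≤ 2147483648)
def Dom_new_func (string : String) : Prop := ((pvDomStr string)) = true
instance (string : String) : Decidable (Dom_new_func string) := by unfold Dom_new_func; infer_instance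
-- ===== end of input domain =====

-- B replaces A's per-character string.index scan by a set of the uppercase chars of string[:4]
-- plus one count per distinct such char (faster; the position/upper-case criteria are equivalent).

-- ===== PORT A =====
-- 'string.index(i)' on the 1-char string i is the index of i's first occurrence:
-- PySem.List.index? on the code points (exact; i comes from string, so it is always 'some').
def new_func (string : String) : String :=
  let cs := string.toList
  let count : Int := cs.foldl (fun acc c =>
    if ((PySem.List.index? cs c).getD 0 ≤ 3) && PySem.Chars.isupper c then acc + 1 else acc) 0
  if count ≥ 2 then PySem.Str.upper string else string

-- ===== PORT B =====
-- 'string.count(c)' for the 1-char string c is List.count on the code points (exact).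
def new_func_alt (string : String) : String :=
  let cs := string.toList
  let qualifying := PySem.Set.ofList ((PySem.List.slice cs none (some 4)).filter PySem.Chars.isupper)
  let count : Int := (qualifying.map (fun c => (cs.count c : Int))).sum
  if count ≥ 2 then PySem.Str.upper string else string

-- ===== PRECONDITION & SPEC =====
def Spec_new_func (string : String) (out : String) : Prop := out = new_func_alt string
instance (string : String) (out : String) : Decidable (Spec_new_func string out) := by unfold Spec_new_func; infer_instance

-- ===== CLAIM (what is proved, stated in full; the proofs are below) =====
def Claim_equal_new_func : Prop := ∀ (string : String), Dom_new_func string → Spec_new_func string (new_func string)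

-- ===== LEMMAS AND PROOFS =====

-- summing the multiplicities of the distinct elements of q counts the members of q with multiplicity
lemma countP_mem_cons (cs : List Char) (h : Char) (t : List Char) (hh : h ∉ t) :
    cs.countP (fun c => decide (c ∈ h :: t)) = cs.count h + cs.countP (fun c => decide (c ∈ t)) := by
  induction cs with
  | nil => simp
  | cons c cs ihc =>
    rw [List.countP_cons, List.countP_cons, List.count_cons, ihc]
    by_cases hc : c = h
    · subst hc; simp [hh]; omega
    · by_cases hct : c ∈ t
      · simp [hc, hct]
        omega
      · simp [hc, hct]

-- summing the multiplicities of the distinct elements of q counts the members of q with multiplicity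
lemma sum_count_eq_countP (cs : List Char) (q : List Char) (hq : q.Nodup) :
    (q.map (fun c => (cs.count c : Int))).sum = (cs.countP (fun c => decide (c ∈ q)) : Int) := by
  induction q with
  | nil => simp
  | cons h t ih =>
    rw [List.map_cons, List.sum_cons, ih (List.nodup_cons.mp hq).2,
      countP_mem_cons cs h t (List.nodup_cons.mp hq).1]
    push_cast
    ring

-- for a member of cs, first-occurrence index ≤ n is membership in the first n+1 characters
lemma idx_le_iff_mem_take (cs : List Char) (c : Char) (n : Nat) (hc : c ∈ cs) :
    ((PySem.List.index? cs c).getD 0 ≤ n) ↔ c ∈ cs.take (n + 1) := by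
  induction cs generalizing n with
  | nil => cases hc
  | cons a cs ih =>
    by_cases hca : a = c
    · subst hca
      rw [PySem.List.index?_cons_self]
      simp [List.take_succ_cons]
    · have hc' : c ∈ cs := by
        cases List.mem_cons.mp hc with
        | inl h => exact absurd h.symm hca
        | inr h => exact h
      rw [PySem.List.index?_cons_of_ne cs hca]
      obtain ⟨k, hk⟩ := Option.isSome_iff_exists.mp
        ((PySem.List.index?_isSome_iff cs c).mpr hc')
      cases n with
      | zero =>
        rw [hk]
        simp [List.take_succ_cons, Ne.symm hca]
      | succ m =>
        have hm := ih m hc'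
        rw [hk] at hm ⊢
        simp only [Option.map_some, Option.getD_some] at hm ⊢
        rw [List.take_succ_cons, List.mem_cons]
        constructor
        · intro h; right; exact hm.mp (by omega)
        · rintro (h | h)
          · exact absurd h.symm hca
          · have := hm.mpr h; omega

lemma counts_eq (cs : List Char) :
    cs.foldl (fun acc c =>
        if ((PySem.List.index? cs c).getD 0 ≤ 3) && PySem.Chars.isupper c then acc + 1 else acc) (0 : Int)
    = (((PySem.Set.ofList ((PySem.List.slice cs none (some 4)).filter PySem.Chars.isupper)).map
        (fun c => (cs.count c : Int))).sum) := by
  rw [PySem.List.foldl_if_add_one, zero_add,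
    sum_count_eq_countP cs _ (PySem.Set.nodup_ofList _)]
  congr 1
  apply List.countP_congr
  intro c hc
  have hidx := idx_le_iff_mem_take cs c 3 hc
  simp only [PySem.List.index?_eq_idxOf?] at hidx
  have h4 : PySem.List.slice cs none (some 4) = cs.take 4 := by
    simpa using PySem.List.slice_to_natCast cs 4
  cases hu : PySem.Chars.isupper c <;>
    simp [hu, PySem.Set.mem_ofList, h4, List.mem_filter, hidx]

-- ===== VERDICT (by name: the statement is the Claim_ definition above) =====
theorem new_func_spec : Claim_equal_new_func := by
  intro s _
  unfold Spec_new_func new_func new_func_alt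
  simp only [counts_eq s.toList]
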